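-- pv_equiv track=rewrite | github.com/ToniMoreau/Portfolio-IA-ML-DL | Projets persos/Blackjack Probabilites/src/probabilites.py | prochain
-- ===== SOURCE A (Python) =====
-- def prochain(element):
--     element = element[:]
--     element[-1] -= 1
--     dernier = element[-1]
--     if len(element) >1:
--         avantdernier = element[-2]
--         if dernier ==avantdernier:
--                 return prochain(element[:-2] + [dernier])
--         if dernier <17:
--             while dernier < 17:
--                 dernier +=10
--                 element.append(dernier)
--             return element
--         else:
--             return element
--     else:
--         if element ==[0]:
--             return
--         while dernier < 17:
--             dernier +=10
--             element.append(dernier)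
--         return element
-- ===== SOURCE B (Python) =====
-- def prochain(element):
--     n = len(element)
--     b = element[-1]
--     m = 0
--     while m < n - 1 and element[n - 2 - m] == b - 1 - m:
--         m += 1
--     v = b - 1 - m
--     res = element[:n - 1 - m] + [v]
--     if res == [0]:
--         return None
--     while v < 17:
--         v += 10
--         res.append(v)
--     return res
-- ===== Notes on version B (the rewrite author's own statement) =====
-- stated objective: alternative
-- what changed: Replaces A's tail recursion (which re-slices and re-copies the list at every merge step) by a single scan that counts the trailing merge run directly and builds the result once.
import Mathlib
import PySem

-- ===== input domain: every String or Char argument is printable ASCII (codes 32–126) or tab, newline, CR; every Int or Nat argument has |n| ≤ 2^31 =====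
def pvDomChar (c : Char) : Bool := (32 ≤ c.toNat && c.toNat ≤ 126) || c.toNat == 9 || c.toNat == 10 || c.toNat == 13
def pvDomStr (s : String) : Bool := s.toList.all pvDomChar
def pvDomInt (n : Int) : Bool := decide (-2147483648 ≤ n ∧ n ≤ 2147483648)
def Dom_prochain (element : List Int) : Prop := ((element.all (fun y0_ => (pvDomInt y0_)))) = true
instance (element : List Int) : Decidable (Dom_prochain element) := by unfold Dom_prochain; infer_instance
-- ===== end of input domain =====

-- ===== PORT A =====
-- B changes: the tail recursion over re-sliced copies is replaced by one scan that
-- counts the trailing merge run; objective: alternative (same behaviour, different shape).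
-- Recursions carry an explicit fuel bound as a totality guard only (always sufficient:
-- the pad loop gains at least 1 per step toward 17, the recursion drops one element per call).
-- while dernier < 17: dernier += 10; element.append(dernier)   (identical loop in A and B)
def padLoop : Nat → Int → List Int → List Int
  | 0, _, element => element
  | fuel + 1, dernier, element =>
    if dernier < 17 then padLoop fuel (dernier + 10) (element ++ [dernier + 10]) else element

def prochainFuel : Nat → List Int → Option (List Int)
  | 0, _ => none
  | fuel + 1, element =>
    if element = [] then none  -- Python raises IndexError here; excluded by Pre_prochain
    else
      let dernier := element.getLast! - 1
      let e := element.dropLast ++ [dernier]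
      if 1 < element.length then
        let avantdernier := element.dropLast.getLast!
        if dernier = avantdernier then
          prochainFuel fuel (element.dropLast.dropLast ++ [dernier])
        else if dernier < 17 then some (padLoop (17 - dernier).toNat dernier e)
        else some e
      else
        if e = [0] then none
        else some (padLoop (17 - dernier).toNat dernier e)

def prochain (element : List Int) : Option (List Int) :=
  prochainFuel element.length element

-- ===== PORT B =====
-- while m < n - 1 and element[n - 2 - m] == b - 1 - m: m += 1
def mergeCount (l : List Int) (b : Int) (n : Nat) : Nat → Nat → Nat
  | 0, m => m
  | fuel + 1, m =>
    if m < n - 1 ∧ l.getD (n - 2 - m) 0 = b - 1 - m then mergeCount l b n fuel (m + 1) else m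

def prochain_alt (element : List Int) : Option (List Int) :=
  if element = [] then none  -- Python raises IndexError here; excluded by Pre_prochain
  else
    let n := element.length
    let b := element.getLast!
    let m := mergeCount element b n n 0
    let v := b - 1 - (m : Int)
    let res := element.take (n - 1 - m) ++ [v]
    if res = [0] then none
    else some (padLoop (17 - v).toNat v res)

-- ===== PRECONDITION & SPEC =====
-- Pre_ excludes only the empty list, on which both Pythons raise IndexError.
def Pre_prochain (element : List Int) : Prop := element ≠ []
instance (element : List Int) : Decidable (Pre_prochain element) := by unfold Pre_prochain; infer_instance
def pvWitness_prochain : List Int := [9, 8, 9]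
def Spec_prochain (element : List Int) (out : Option (List Int)) : Prop := out = prochain_alt element
instance (element : List Int) (out : Option (List Int)) : Decidable (Spec_prochain element out) := by unfold Spec_prochain; infer_instance

-- ===== CLAIM (what is proved, stated in full; the proofs are below) =====
def Claim_equal_prochain : Prop := ∀ (element : List Int), Dom_prochain element → Pre_prochain element → Spec_prochain element (prochain element)


-- ===== LEMMAS AND PROOFS =====

theorem getLast!_concat (l : List Int) (a : Int) : (l ++ [a]).getLast! = a := by
  induction l with
  | nil => rfl
  | cons y ys ih => simpa [List.getLast!] using ih

theorem getD_concat_lt (l : List Int) (a : Int) (i : Nat) (h : i < l.length) (d : Int) :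
    (l ++ [a]).getD i d = l.getD i d := by
  simp [List.getD, List.getElem?_append_left h]

theorem getD_dropLast (l : List Int) (i : Nat) (h : i < l.length - 1) (d : Int) :
    l.dropLast.getD i d = l.getD i d := by
  have h2 : i < l.dropLast.length := by simp; omega
  have h3 : i < l.length := by omega
  rw [List.getD_eq_getElem l d h3, List.getD_eq_getElem _ d h2]
  simp [List.getElem_dropLast]

theorem getD_last (l : List Int) (h : l ≠ []) : l.getD (l.length - 1) 0 = l.getLast! := by
  induction l with
  | nil => simp at h
  | cons y ys ih =>
    cases ys with
    | nil => rfl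
    | cons z zs => simpa [List.getD, List.getLast!] using ih (by simp)

theorem take_dropLast_eq (l : List Int) (k : Nat) (h : k ≤ l.length - 1) :
    l.dropLast.take k = l.take k := by
  rw [List.dropLast_eq_take, List.take_take]
  simp [Nat.min_eq_left h]

theorem padLoop_ge (f : Nat) (d : Int) (e : List Int) (h : ¬ d < 17) : padLoop f d e = e := by
  cases f <;> simp [padLoop, h]

theorem mc_succ (l l' : List Int) (b : Int) (n : Nat)
    (hcond : ∀ m : Nat, (m + 1 < n - 1 ∧ l.getD (n - 3 - m) 0 = b - 2 - (m : Int)) ↔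
      (m < n - 1 - 1 ∧ l'.getD (n - 1 - 2 - m) 0 = (b - 1) - 1 - (m : Int))) :
    ∀ (fuel m : Nat), mergeCount l b n fuel (m + 1) = mergeCount l' (b - 1) (n - 1) fuel m + 1 := by
  have condL : ∀ m : Nat, (m + 1 < n - 1 ∧ l.getD (n - 2 - (m + 1)) 0 = b - 1 - ((m + 1 : Nat) : Int)) ↔
      (m + 1 < n - 1 ∧ l.getD (n - 3 - m) 0 = b - 2 - (m : Int)) := by
    intro m
    have e1 : n - 2 - (m + 1) = n - 3 - m := by omega
    rw [e1]
    constructor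
    · rintro ⟨h1, h2⟩; exact ⟨h1, by rw [h2]; push_cast; ring⟩
    · rintro ⟨h1, h2⟩; exact ⟨h1, by rw [h2]; push_cast; ring⟩
  intro fuel
  induction fuel with
  | zero => intro m; rfl
  | succ f ih =>
    intro m
    show (if m + 1 < n - 1 ∧ l.getD (n - 2 - (m + 1)) 0 = b - 1 - ((m + 1 : Nat) : Int)
        then mergeCount l b n f (m + 1 + 1) else m + 1)
      = (if m < n - 1 - 1 ∧ l'.getD (n - 1 - 2 - m) 0 = b - 1 - 1 - (m : Int)
        then mergeCount l' (b - 1) (n - 1) f (m + 1) else m) + 1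
    by_cases hc : m + 1 < n - 1 ∧ l.getD (n - 3 - m) 0 = b - 2 - (m : Int)
    · rw [if_pos ((condL m).mpr hc), if_pos ((hcond m).mp hc)]
      exact ih (m + 1)
    · rw [if_neg (by intro h; exact hc ((condL m).mp h)),
        if_neg (by intro h; exact hc ((hcond m).mpr ⟨h.1, h.2⟩))]

-- the B-side shift: one merge step of A leaves prochain_alt unchanged
theorem alt_merge (I : List Int) (x : Int) (hI : I ≠ []) (hm : x - 1 = I.getLast!) :
    prochain_alt (I ++ [x]) = prochain_alt (I.dropLast ++ [x - 1]) := by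
  have hlen : 1 ≤ I.length := List.length_pos_of_ne_nil hI
  have hne1 : I ++ [x] ≠ [] := by simp
  have hne2 : I.dropLast ++ [x - 1] ≠ [] := by simp
  rw [prochain_alt, prochain_alt]
  rw [if_neg hne1, if_neg hne2]
  simp only [List.length_append, List.length_cons, List.length_nil,
    getLast!_concat, List.length_dropLast]
  -- first merge step of the count on the left
  have hstep : mergeCount (I ++ [x]) x (I.length + 1) (I.length + 1) 0
      = mergeCount (I ++ [x]) x (I.length + 1) I.length 1 := by
    show (if 0 < I.length + 1 - 1 ∧ (I ++ [x]).getD (I.length + 1 - 2 - 0) 0 = x - 1 - ((0 : Nat) : Int)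
        then mergeCount (I ++ [x]) x (I.length + 1) I.length (0 + 1) else 0)
      = mergeCount (I ++ [x]) x (I.length + 1) I.length 1
    rw [if_pos]
    constructor
    · omega
    · have e1 : I.length + 1 - 2 - 0 = I.length - 1 := by omega
      rw [e1, getD_concat_lt _ _ _ (by omega), getD_last I hI]
      push_cast; omega
  have hcond : ∀ m : Nat, (m + 1 < I.length + 1 - 1 ∧ (I ++ [x]).getD (I.length + 1 - 3 - m) 0 = x - 2 - (m : Int)) ↔
      (m < I.length + 1 - 1 - 1 ∧ (I.dropLast ++ [x - 1]).getD (I.length + 1 - 1 - 2 - m) 0 = (x - 1) - 1 - (m : Int)) := by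
    intro m
    constructor
    · rintro ⟨h1, h2⟩
      refine ⟨by omega, ?_⟩
      have e1 : I.length + 1 - 1 - 2 - m = I.length + 1 - 3 - m := by omega
      have hidx : I.length + 1 - 3 - m < I.length - 1 := by omega
      rw [e1, getD_concat_lt _ _ _ (by simp; try omega), getD_dropLast _ _ hidx]
      rw [getD_concat_lt _ _ _ (by omega)] at h2
      rw [h2]; ring
    · rintro ⟨h1, h2⟩
      refine ⟨by omega, ?_⟩
      have e1 : I.length + 1 - 1 - 2 - m = I.length + 1 - 3 - m := by omega
      have hidx : I.length + 1 - 3 - m < I.length - 1 := by omega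
      rw [e1, getD_concat_lt _ _ _ (by simp; try omega), getD_dropLast _ _ hidx] at h2
      rw [getD_concat_lt _ _ _ (by omega), h2]
      ring
  have hshift := mc_succ (I ++ [x]) (I.dropLast ++ [x - 1]) x (I.length + 1) hcond I.length 0
  simp only [Nat.add_sub_cancel] at hshift
  set m' := mergeCount (I.dropLast ++ [x - 1]) (x - 1) I.length I.length 0 with hm'
  have hmtot : mergeCount (I ++ [x]) x (I.length + 1) (I.length + 1) 0 = m' + 1 := by
    rw [hstep, hshift]
  rw [hmtot]
  -- values and prefixes coincide
  have hv : x - 1 - ((m' + 1 : Nat) : Int) = x - 1 - 1 - (m' : Int) := by push_cast; ring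
  have htk : (I ++ [x]).take (I.length + 1 - 1 - (m' + 1))
      = (I.dropLast ++ [x - 1]).take (I.length - 1 - m') := by
    have e1 : I.length + 1 - 1 - (m' + 1) = I.length - 1 - m' := by omega
    rw [e1, List.take_append_of_le_length (by omega),
       List.take_append_of_le_length (by simp; try omega),
       take_dropLast_eq _ _ (by omega)]
  rw [hv, htk]
  have enat : I.length - 1 + (0 + 1) = I.length := by omega
  rw [enat, ← hm']

theorem main_equiv : ∀ (l : List Int), l ≠ [] → prochain l = prochain_alt l := by
  have H : ∀ fuel (l : List Int), l.length = fuel → l ≠ [] → prochainFuel fuel l = prochain_alt l := by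
    intro fuel
    induction fuel with
    | zero =>
      intro l h1 h2
      cases l with
      | nil => exact absurd rfl h2
      | cons y ys => simp at h1
    | succ N ih =>
      intro l hlen hne
      rcases List.eq_nil_or_concat l with rfl | ⟨I, x, rfl⟩
      · exact absurd rfl hne
      rw [List.concat_eq_append] at hlen hne ⊢
      cases I with
      | nil =>
        -- singleton [x]: both sides decrement once and pad
        simp only [List.nil_append] at hlen hne ⊢
        rw [prochainFuel, prochain_alt]
        norm_num
      | cons y ys =>
        set I : List Int := y :: ys with hI
        have hIne : I ≠ [] := by simp [hI]
        have hlast : (I ++ [x]).getLast! = x := getLast!_concat I x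
        have hne1 : I ++ [x] ≠ [] := by simp
        have hgt : 1 < (I ++ [x]).length := by simp [hI]
        rw [prochainFuel]
        rw [if_neg hne1, if_pos hgt]
        simp only [hlast, List.dropLast_concat]
        by_cases hmg : x - 1 = I.getLast!
        · -- merge branch: A recurses; B is invariant under the merge (alt_merge)
          rw [if_pos hmg]
          have hrec : prochainFuel N (I.dropLast ++ [x - 1]) = prochain_alt (I.dropLast ++ [x - 1]) := by
            apply ih
            · simp [hI] at hlen ⊢; omega
            · simp
          rw [hrec, ← alt_merge I x hIne hmg]
        · -- no merge: both sides return the decremented list, padded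
          rw [if_neg hmg]
          rw [prochain_alt, if_neg hne1]
          simp only [hlast]
          have hN : (I ++ [x]).length = I.length + 1 := by simp
          rw [hN]
          have hm0 : mergeCount (I ++ [x]) x (I.length + 1) (I.length + 1) 0 = 0 := by
            show (if 0 < I.length + 1 - 1 ∧ (I ++ [x]).getD (I.length + 1 - 2 - 0) 0 = x - 1 - ((0 : Nat) : Int)
                then mergeCount (I ++ [x]) x (I.length + 1) I.length 1 else 0) = 0
            rw [if_neg]
            rintro ⟨h1, h2⟩
            apply hmg
            have e1 : I.length + 1 - 2 - 0 = I.length - 1 := by omega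
            rw [e1, getD_concat_lt _ _ _ (by simp [hI]; try omega), getD_last I hIne] at h2
            push_cast at h2; omega
          rw [hm0]
          have htk : (I ++ [x]).take (I.length + 1 - 1 - 0) = I := by
            have e1 : I.length + 1 - 1 - 0 = I.length := by omega
            rw [e1, List.take_left]
          rw [htk]
          have hres0 : ¬ (I ++ [x - 1 - ((0 : Nat) : Int)] = [0]) := by
            intro h
            have := congrArg List.length h
            simp [hI] at this
          rw [if_neg hres0]
          have hv0 : x - 1 - ((0 : Nat) : Int) = x - 1 := by push_cast; ring
          rw [hv0]
          by_cases hlt : x - 1 < 17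
          · rw [if_pos hlt]
          · rw [if_neg hlt]
            rw [padLoop_ge _ _ _ hlt]
  intro l hne
  rw [prochain]
  exact H l.length l rfl hne

-- ===== VERDICT (by name: the statement is the Claim_ definition above) =====
theorem prochain_spec : Claim_equal_prochain := by
  intro element _ hpre
  unfold Spec_prochain
  exact main_equiv element hpre
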